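-- pv_equiv track=rewrite | github.com/RUiNtheExtinct/project-euler | python/p026.py | factorize
-- ===== SOURCE A (Python) =====
-- def factorize(n):
--     while n % 2 == 0:
--         n //= 2
--     while n % 5 == 0:
--         n //= 5
--     if n != 1:
--         return False
--     return True
-- ===== SOURCE B (Python) =====
-- def _gcd(a, b):
--     while b:
--         a, b = b, a % b
--     return a
--
-- def factorize(n):
--     g = _gcd(n, 10)
--     while g != 1:
--         n //= g
--         g = _gcd(n, 10)
--     return n == 1
-- ===== Notes on version B (the rewrite author's own statement) =====
-- stated objective: alternative
-- what changed: Replaces A's two separate prime-stripping while-loops (first all 2s, then all 5s) by a single loop that repeatedly divides n by gcd(n, 10) (hand-written Euclid) until the gcd is 1, then tests n == 1.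
import Mathlib
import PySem

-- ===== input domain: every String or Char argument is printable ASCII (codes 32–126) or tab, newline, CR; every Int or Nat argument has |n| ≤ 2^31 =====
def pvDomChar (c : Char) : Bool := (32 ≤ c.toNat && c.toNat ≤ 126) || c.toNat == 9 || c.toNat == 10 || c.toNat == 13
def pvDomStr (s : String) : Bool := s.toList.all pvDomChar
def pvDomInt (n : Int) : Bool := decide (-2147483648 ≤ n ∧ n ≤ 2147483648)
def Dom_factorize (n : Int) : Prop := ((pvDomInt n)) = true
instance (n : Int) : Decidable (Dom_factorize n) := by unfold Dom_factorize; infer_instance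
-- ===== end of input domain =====

-- B replaces A's two separate prime-stripping while-loops by a single loop that divides
-- by gcd(n, 10) (Euclid's algorithm, hand-written since A imports nothing) until the gcd
-- is 1 (objective: alternative decomposition). Equivalence is proved for n ≠ 0; on
-- n = 0 both Pythons loop forever.  Each while loop is ported by structural recursion on
-- a fuel of |n| steps, which the fuel-irrelevance lemmas below show is always enough;
-- the 'n ≠ 0' conjunct only makes the loops total (Pre_ excludes n = 0).

-- ===== PORT A =====
-- 'while n % 2 == 0: n //= 2'
def strip2Go : Nat → Int → Int
  | 0, n => n
  | f + 1, n =>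
    if PySem.Int.mod n 2 = 0 ∧ n ≠ 0 then strip2Go f (PySem.Int.floordiv n 2) else n

-- 'while n % 5 == 0: n //= 5'
def strip5Go : Nat → Int → Int
  | 0, n => n
  | f + 1, n =>
    if PySem.Int.mod n 5 = 0 ∧ n ≠ 0 then strip5Go f (PySem.Int.floordiv n 5) else n

def factorize (n : Int) : Bool :=
  let n1 := strip2Go n.natAbs n
  let n2 := strip5Go n1.natAbs n1
  if n2 ≠ 1 then false else true

-- ===== PORT B =====
-- Source B's _gcd: 'while b: a, b = b, a % b; return a'  (Euclid needs at most |b| + 1 rounds)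
def pyGcdGo : Nat → Int → Int → Int
  | 0, a, _ => a
  | f + 1, a, b => if b ≠ 0 then pyGcdGo f b (PySem.Int.mod a b) else a

def pyGcd (a b : Int) : Int := pyGcdGo (b.natAbs + 1) a b

-- 'g = gcd(n, 10); while g != 1: n //= g; g = gcd(n, 10)'
def loopGo : Nat → Int → Int
  | 0, n => n
  | f + 1, n =>
    if pyGcd n 10 ≠ 1 ∧ n ≠ 0 then loopGo f (PySem.Int.floordiv n (pyGcd n 10)) else n

def factorize_alt (n : Int) : Bool := decide (loopGo n.natAbs n = 1)

-- ===== PRECONDITION & SPEC =====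
-- Pre_ excludes exactly n = 0, on which Python A never returns (its first while loop runs forever; B's loop does too).
def Pre_factorize (n : Int) : Prop := n ≠ 0
instance (n : Int) : Decidable (Pre_factorize n) := by unfold Pre_factorize; infer_instance
def pvWitness_factorize : Int := (7)

def Spec_factorize (n : Int) (out : Bool) : Prop := out = factorize_alt n
instance (n : Int) (out : Bool) : Decidable (Spec_factorize n out) := by unfold Spec_factorize; infer_instance

-- ===== CLAIM (what is proved, stated in full; the proofs are below) =====
def Claim_equal_factorize : Prop := ∀ (n : Int), Dom_factorize n → Pre_factorize n → Spec_factorize n (factorize n)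

-- ===== LEMMAS AND PROOFS =====

-- dividing a nonzero multiple of p (2 ≤ p) shrinks |n|
theorem pv_natAbs_floordiv_lt (n p : Int) (hp : 2 ≤ p) (hd : p ∣ n) (hn : n ≠ 0) :
    (PySem.Int.floordiv n p).natAbs < n.natAbs := by
  rw [PySem.Int.floordiv_eq_ediv_of_pos (by omega)]
  obtain ⟨k, rfl⟩ := hd
  rw [Int.mul_ediv_cancel_left _ (by omega)]
  have hk : k ≠ 0 := by rintro rfl; simp at hn
  have : (p * k).natAbs = p.natAbs * k.natAbs := Int.natAbs_mul p k
  have hk' : 1 ≤ k.natAbs := by omega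
  have hp' : 2 ≤ p.natAbs := by omega
  nlinarith

theorem natAbs_ediv_lt {n p : Int} (hp : 2 ≤ p) (hd : p ∣ n) (hn : n ≠ 0) :
    (n / p).natAbs < n.natAbs := by
  rw [← PySem.Int.floordiv_eq_ediv_of_pos (by omega : (0:Int) < p)]
  exact pv_natAbs_floordiv_lt n p hp hd hn

-- ---- fuel irrelevance: |n| steps are always enough for the stripping loops ----

theorem strip2Go_zero : ∀ f : Nat, strip2Go f 0 = 0
  | 0 => rfl
  | f + 1 => by rw [strip2Go, if_neg (by rintro ⟨-, hc⟩; exact hc rfl)]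

theorem strip5Go_zero : ∀ f : Nat, strip5Go f 0 = 0
  | 0 => rfl
  | f + 1 => by rw [strip5Go, if_neg (by rintro ⟨-, hc⟩; exact hc rfl)]

theorem strip2Go_mono : ∀ (f₁ : Nat), ∀ (f₂ : Nat) (n : Int), n.natAbs ≤ f₁ → n.natAbs ≤ f₂ →
    strip2Go f₁ n = strip2Go f₂ n := by
  intro f₁
  induction f₁ with
  | zero =>
    intro f₂ n h1 _
    have hn : n = 0 := by omega
    subst hn
    exact (strip2Go_zero f₂).symm
  | succ f ih =>
    intro f₂ n h1 h2
    by_cases hg : PySem.Int.mod n 2 = 0 ∧ n ≠ 0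
    · have hd : (2:Int) ∣ n := (PySem.Int.mod_eq_zero_iff_dvd n 2).mp hg.1
      have hlt : (PySem.Int.floordiv n 2).natAbs < n.natAbs :=
        pv_natAbs_floordiv_lt n 2 (by decide) hd hg.2
      have hn2 : 2 ≤ n.natAbs := by
        obtain ⟨k, hk⟩ := hd
        have : n.natAbs = 2 * k.natAbs := by rw [hk]; exact Int.natAbs_mul 2 k
        have : k ≠ 0 := by rintro rfl; exact hg.2 (by omega)
        omega
      obtain ⟨k, rfl⟩ : ∃ k, f₂ = k + 1 := ⟨f₂ - 1, by omega⟩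
      rw [strip2Go, strip2Go, if_pos hg, if_pos hg]
      exact ih k (PySem.Int.floordiv n 2) (by omega) (by omega)
    · obtain ⟨k, rfl⟩ | rfl : (∃ k, f₂ = k + 1) ∨ f₂ = 0 := by
        rcases f₂ with _ | k
        · right; rfl
        · left; exact ⟨k, rfl⟩
      · rw [strip2Go, strip2Go, if_neg hg, if_neg hg]
      · have hn : n = 0 := by omega
        subst hn
        exact strip2Go_zero (f + 1)

theorem strip5Go_mono : ∀ (f₁ : Nat), ∀ (f₂ : Nat) (n : Int), n.natAbs ≤ f₁ → n.natAbs ≤ f₂ →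
    strip5Go f₁ n = strip5Go f₂ n := by
  intro f₁
  induction f₁ with
  | zero =>
    intro f₂ n h1 _
    have hn : n = 0 := by omega
    subst hn
    exact (strip5Go_zero f₂).symm
  | succ f ih =>
    intro f₂ n h1 h2
    by_cases hg : PySem.Int.mod n 5 = 0 ∧ n ≠ 0
    · have hd : (5:Int) ∣ n := (PySem.Int.mod_eq_zero_iff_dvd n 5).mp hg.1
      have hlt : (PySem.Int.floordiv n 5).natAbs < n.natAbs :=
        pv_natAbs_floordiv_lt n 5 (by decide) hd hg.2
      have hn2 : 1 ≤ n.natAbs := by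
        have : n ≠ 0 := hg.2
        omega
      obtain ⟨k, rfl⟩ : ∃ k, f₂ = k + 1 := ⟨f₂ - 1, by omega⟩
      rw [strip5Go, strip5Go, if_pos hg, if_pos hg]
      exact ih k (PySem.Int.floordiv n 5) (by omega) (by omega)
    · obtain ⟨k, rfl⟩ | rfl : (∃ k, f₂ = k + 1) ∨ f₂ = 0 := by
        rcases f₂ with _ | k
        · right; rfl
        · left; exact ⟨k, rfl⟩
      · rw [strip5Go, strip5Go, if_neg hg, if_neg hg]
      · have hn : n = 0 := by omega
        subst hn
        exact strip5Go_zero (f + 1)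

-- the stripping loops through their wrappers
def strip2A (n : Int) : Int := strip2Go n.natAbs n
def strip5A (n : Int) : Int := strip5Go n.natAbs n

theorem strip2A_step {n : Int} (hn : n ≠ 0) (hd : (2:Int) ∣ n) : strip2A n = strip2A (n / 2) := by
  unfold strip2A
  have hn2 : 2 ≤ n.natAbs := by
    obtain ⟨k, hk⟩ := hd
    have : n.natAbs = 2 * k.natAbs := by rw [hk]; exact Int.natAbs_mul 2 k
    have : k ≠ 0 := by rintro rfl; exact hn (by omega)
    omega
  obtain ⟨k, hk⟩ : ∃ k, n.natAbs = k + 1 := ⟨n.natAbs - 1, by omega⟩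
  have hg : PySem.Int.mod n 2 = 0 ∧ n ≠ 0 := ⟨(PySem.Int.mod_eq_zero_iff_dvd n 2).mpr hd, hn⟩
  have hfd : PySem.Int.floordiv n 2 = n / 2 := PySem.Int.floordiv_eq_ediv_of_pos (by decide)
  have hlt : (n / 2).natAbs < n.natAbs := natAbs_ediv_lt (by decide) hd hn
  rw [hk, strip2Go, if_pos hg, hfd]
  exact strip2Go_mono k (n / 2).natAbs (n / 2) (by omega) le_rfl

theorem strip2A_stop {n : Int} (hd : ¬ (2:Int) ∣ n) : strip2A n = n := by
  unfold strip2A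
  have hn : n ≠ 0 := by rintro rfl; exact hd ⟨0, by ring⟩
  obtain ⟨k, hk⟩ : ∃ k, n.natAbs = k + 1 := ⟨n.natAbs - 1, by omega⟩
  rw [hk, strip2Go, if_neg (by
    rintro ⟨hm, -⟩
    exact hd ((PySem.Int.mod_eq_zero_iff_dvd n 2).mp hm))]

theorem strip5A_step {n : Int} (hn : n ≠ 0) (hd : (5:Int) ∣ n) : strip5A n = strip5A (n / 5) := by
  unfold strip5A
  obtain ⟨k, hk⟩ : ∃ k, n.natAbs = k + 1 := ⟨n.natAbs - 1, by omega⟩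
  have hg : PySem.Int.mod n 5 = 0 ∧ n ≠ 0 := ⟨(PySem.Int.mod_eq_zero_iff_dvd n 5).mpr hd, hn⟩
  have hfd : PySem.Int.floordiv n 5 = n / 5 := PySem.Int.floordiv_eq_ediv_of_pos (by decide)
  have hlt : (n / 5).natAbs < n.natAbs := natAbs_ediv_lt (by decide) hd hn
  rw [hk, strip5Go, if_pos hg, hfd]
  exact strip5Go_mono k (n / 5).natAbs (n / 5) (by omega) le_rfl

theorem strip5A_stop {n : Int} (hd : ¬ (5:Int) ∣ n) : strip5A n = n := by
  unfold strip5A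
  have hn : n ≠ 0 := by rintro rfl; exact hd ⟨0, by ring⟩
  obtain ⟨k, hk⟩ : ∃ k, n.natAbs = k + 1 := ⟨n.natAbs - 1, by omega⟩
  rw [hk, strip5Go, if_neg (by
    rintro ⟨hm, -⟩
    exact hd ((PySem.Int.mod_eq_zero_iff_dvd n 5).mp hm))]

-- ---- pyGcd is the real gcd (fuel |b| + 1 is enough for Euclid) ----

theorem pyGcdGo_eq_gcd : ∀ (f : Nat), ∀ (a b : Int), 0 < b → b.natAbs < f →
    pyGcdGo f a b = (Int.gcd a b : Int) := by
  intro f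
  induction f with
  | zero => intro a b hb hf; omega
  | succ k ih =>
    intro a b hb hf
    rw [pyGcdGo, if_pos (by omega : b ≠ 0)]
    have hmod : PySem.Int.mod a b = a % b := PySem.Int.mod_eq_emod_of_pos hb
    have hgr : Int.gcd b (a % b) = Int.gcd a b := by
      rw [Int.gcd_comm, Int.gcd_emod]
    rcases eq_or_lt_of_le (Int.emod_nonneg a (by omega : b ≠ 0)) with hz | hpos
    · -- a % b = 0 : next round returns b, which is the gcd
      obtain ⟨j, rfl⟩ : ∃ j, k = j + 1 := ⟨k - 1, by omega⟩
      rw [hmod, ← hz, pyGcdGo, if_neg (by omega : ¬ (0:Int) ≠ 0)]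
      rw [← hgr, ← hz, Int.gcd_zero_right]
      omega
    · have hlt : a % b < b := Int.emod_lt_of_pos a hb
      rw [hmod, ih b (a % b) (by omega) (by omega), hgr]

theorem pyGcd_eq_gcd (a b : Int) (hb : 0 < b) : pyGcd a b = (Int.gcd a b : Int) :=
  pyGcdGo_eq_gcd (b.natAbs + 1) a b hb (by omega)

-- gcd with 10, by divisibility by 2 and 5
theorem gcd_ten (n : Int) : (Int.gcd n 10 : Int) =
    if (2:Int) ∣ n then (if (5:Int) ∣ n then 10 else 2) else (if (5:Int) ∣ n then 5 else 1) := by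
  have h2 : ((2:Int) ∣ n) ↔ (2 ∣ n.natAbs) :=
    ⟨fun h => Int.natAbs_dvd_natAbs.mpr h, fun h => Int.natAbs_dvd_natAbs.mp h⟩
  have h5 : ((5:Int) ∣ n) ↔ (5 ∣ n.natAbs) :=
    ⟨fun h => Int.natAbs_dvd_natAbs.mpr h, fun h => Int.natAbs_dvd_natAbs.mp h⟩
  have key : Nat.gcd n.natAbs 10 =
      if 2 ∣ n.natAbs then (if 5 ∣ n.natAbs then 10 else 2) else (if 5 ∣ n.natAbs then 5 else 1) := by
    set m := n.natAbs with hm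
    rw [Nat.gcd_comm, Nat.gcd_rec 10 m]
    obtain ⟨r, hrlt, hre⟩ : ∃ r, r < 10 ∧ m % 10 = r := ⟨m % 10, Nat.mod_lt _ (by omega), rfl⟩
    rw [hre]
    interval_cases r <;>
      first
      | (rw [if_pos (show (2:ℕ) ∣ m by omega), if_pos (show (5:ℕ) ∣ m by omega)]; rfl)
      | (rw [if_pos (show (2:ℕ) ∣ m by omega), if_neg (show ¬(5:ℕ) ∣ m by omega)]; rfl)
      | (rw [if_neg (show ¬(2:ℕ) ∣ m by omega), if_pos (show (5:ℕ) ∣ m by omega)]; rfl)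
      | (rw [if_neg (show ¬(2:ℕ) ∣ m by omega), if_neg (show ¬(5:ℕ) ∣ m by omega)]; rfl)
  have hg : Int.gcd n 10 = Nat.gcd n.natAbs 10 := rfl
  rw [hg, key]
  by_cases c2 : (2:Int) ∣ n <;> by_cases c5 : (5:Int) ∣ n
  · rw [if_pos (h2.mp c2), if_pos (h5.mp c5), if_pos c2, if_pos c5]; rfl
  · rw [if_pos (h2.mp c2), if_neg (fun h => c5 (h5.mpr h)), if_pos c2, if_neg c5]; rfl
  · rw [if_neg (fun h => c2 (h2.mpr h)), if_pos (h5.mp c5), if_neg c2, if_pos c5]; rfl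
  · rw [if_neg (fun h => c2 (h2.mpr h)), if_neg (fun h => c5 (h5.mpr h)), if_neg c2, if_neg c5]; rfl

-- when the loop steps, it divides by a divisor ≥ 2, so |n| shrinks
theorem loop_dec {n : Int} (h1 : n ≠ 0) (h2 : pyGcd n 10 ≠ 1) :
    (PySem.Int.floordiv n (pyGcd n 10)).natAbs < n.natAbs := by
  refine pv_natAbs_floordiv_lt n (pyGcd n 10) ?_ ?_ h1
  · rw [pyGcd_eq_gcd n 10 (by decide)]
    have h0 : Int.gcd n 10 ≠ 0 := by simp [Int.gcd_eq_zero_iff]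
    have hg1 : Int.gcd n 10 ≠ 1 := by
      intro hc
      exact h2 (by rw [pyGcd_eq_gcd n 10 (by decide), hc]; rfl)
    omega
  · rw [pyGcd_eq_gcd n 10 (by decide)]
    exact Int.gcd_dvd_left n 10

theorem loopGo_zero : ∀ f : Nat, loopGo f 0 = 0
  | 0 => rfl
  | f + 1 => by rw [loopGo, if_neg (by rintro ⟨-, hc⟩; exact hc rfl)]

theorem loopGo_mono : ∀ (f₁ : Nat), ∀ (f₂ : Nat) (n : Int), n.natAbs ≤ f₁ → n.natAbs ≤ f₂ →
    loopGo f₁ n = loopGo f₂ n := by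
  intro f₁
  induction f₁ with
  | zero =>
    intro f₂ n h1 _
    have hn : n = 0 := by omega
    subst hn
    exact (loopGo_zero f₂).symm

  | succ f ih =>
    intro f₂ n h1 h2
    by_cases hg : pyGcd n 10 ≠ 1 ∧ n ≠ 0
    · have hlt : (PySem.Int.floordiv n (pyGcd n 10)).natAbs < n.natAbs := loop_dec hg.2 hg.1
      have hn1 : 1 ≤ n.natAbs := by
        have := hg.2
        omega
      obtain ⟨k, rfl⟩ : ∃ k, f₂ = k + 1 := ⟨f₂ - 1, by omega⟩
      rw [loopGo, loopGo, if_pos hg, if_pos hg]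
      exact ih k (PySem.Int.floordiv n (pyGcd n 10)) (by omega) (by omega)
    · obtain ⟨k, rfl⟩ | rfl : (∃ k, f₂ = k + 1) ∨ f₂ = 0 := by
        rcases f₂ with _ | k
        · right; rfl
        · left; exact ⟨k, rfl⟩
      · rw [loopGo, loopGo, if_neg hg, if_neg hg]
      · have hn : n = 0 := by omega
        subst hn
        exact loopGo_zero (f + 1)

def loopB (n : Int) : Int := loopGo n.natAbs n

theorem loopB_step {n : Int} (hn : n ≠ 0) (hg : pyGcd n 10 ≠ 1) :
    loopB n = loopB (n / pyGcd n 10) := by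
  unfold loopB
  obtain ⟨k, hk⟩ : ∃ k, n.natAbs = k + 1 := ⟨n.natAbs - 1, by omega⟩
  have hpos : 0 < pyGcd n 10 := by
    rw [pyGcd_eq_gcd n 10 (by decide)]
    have h0 : Int.gcd n 10 ≠ 0 := by simp [Int.gcd_eq_zero_iff]
    omega
  have hfd : PySem.Int.floordiv n (pyGcd n 10) = n / pyGcd n 10 :=
    PySem.Int.floordiv_eq_ediv_of_pos hpos
  have hlt : (PySem.Int.floordiv n (pyGcd n 10)).natAbs < n.natAbs := loop_dec hn hg
  rw [hk, loopGo, if_pos ⟨hg, hn⟩, hfd]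
  exact loopGo_mono k (n / pyGcd n 10).natAbs (n / pyGcd n 10) (by rw [← hfd]; omega) le_rfl

theorem loopB_stop {n : Int} (hg : pyGcd n 10 = 1) : loopB n = n := by
  unfold loopB
  by_cases h0 : n = 0
  · subst h0
    exact loopGo_zero _
  · obtain ⟨k, hk⟩ : ∃ k, n.natAbs = k + 1 := ⟨n.natAbs - 1, by omega⟩
    rw [hk, loopGo, if_neg (by rintro ⟨hc, -⟩; exact hc hg)]

-- removing one factor 5 anywhere does not change strip5A ∘ strip2A
theorem strip_five_aux (m : Nat) : ∀ n : Int, n.natAbs ≤ m → n ≠ 0 → (5:Int) ∣ n →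
    strip5A (strip2A n) = strip5A (strip2A (n / 5)) := by
  induction m with
  | zero => intro n hm hn _; omega
  | succ k ih =>
    intro n hm hn h5
    by_cases h2 : (2:Int) ∣ n
    · obtain ⟨j, hj⟩ : (10:Int) ∣ n := by omega
      have hj0 : j ≠ 0 := by rintro rfl; omega
      have e2 : n / 2 = 5 * j := by
        rw [hj, show (10:Int) * j = 2 * (5 * j) by ring, Int.mul_ediv_cancel_left _ (by omega)]
      have e5 : n / 5 = 2 * j := by
        rw [hj, show (10:Int) * j = 5 * (2 * j) by ring, Int.mul_ediv_cancel_left _ (by omega)]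
      have e25 : n / 2 / 5 = j := by
        rw [e2, Int.mul_ediv_cancel_left _ (by omega)]
      have e52 : n / 5 / 2 = j := by
        rw [e5, Int.mul_ediv_cancel_left _ (by omega)]
      rw [strip2A_step hn h2]
      have hlt : (n / 2).natAbs < n.natAbs := natAbs_ediv_lt (by decide) h2 hn
      rw [ih (n / 2) (by omega) (by rw [e2]; positivity) (by rw [e2]; exact ⟨j, rfl⟩), e25]
      have hn5 : n / 5 ≠ 0 := by rw [e5]; positivity
      rw [strip2A_step hn5 (by rw [e5]; exact ⟨j, rfl⟩), e52]
    · have hstop : strip2A n = n := strip2A_stop h2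
      obtain ⟨j, hj⟩ := h5
      have e5 : n / 5 = j := by rw [hj, Int.mul_ediv_cancel_left _ (by omega)]
      have h2j : ¬ (2:Int) ∣ (n / 5) := by
        rw [e5]; intro ⟨t, ht⟩; exact h2 ⟨5 * t, by rw [hj, ht]; ring⟩
      rw [hstop, strip2A_stop h2j, strip5A_step hn ⟨j, hj⟩]

-- the gcd loop computes exactly A's double strip
theorem loopB_eq_aux (m : Nat) : ∀ n : Int, n.natAbs ≤ m → n ≠ 0 →
    loopB n = strip5A (strip2A n) := by
  induction m with
  | zero => intro n hm hn; omega
  | succ k ih =>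
    intro n hm hn
    have hg : pyGcd n 10 = (Int.gcd n 10 : Int) := pyGcd_eq_gcd n 10 (by decide)
    by_cases h2 : (2:Int) ∣ n <;> by_cases h5 : (5:Int) ∣ n
    · -- g = 10
      have hgv : pyGcd n 10 = 10 := by rw [hg, gcd_ten, if_pos h2, if_pos h5]
      obtain ⟨j, hj⟩ : (10:Int) ∣ n := by omega
      have hj0 : j ≠ 0 := by rintro rfl; omega
      have e10 : n / 10 = j := by rw [hj, Int.mul_ediv_cancel_left _ (by omega)]
      have hlt : (n / 10).natAbs < n.natAbs := natAbs_ediv_lt (by decide) ⟨j, hj⟩ hn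
      rw [loopB_step hn (by rw [hgv]; decide), hgv,
        ih (n / 10) (by omega) (by rw [e10]; exact hj0)]
      have e2 : n / 2 = 5 * j := by
        rw [hj, show (10:Int) * j = 2 * (5 * j) by ring, Int.mul_ediv_cancel_left _ (by omega)]
      have e25 : n / 2 / 5 = j := by rw [e2, Int.mul_ediv_cancel_left _ (by omega)]
      have hn2 : n / 2 ≠ 0 := by rw [e2]; positivity
      rw [strip2A_step hn h2,
        strip_five_aux (n / 2).natAbs (n / 2) le_rfl hn2 (by rw [e2]; exact ⟨j, rfl⟩), e25, e10]
    · -- g = 2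
      have hgv : pyGcd n 10 = 2 := by rw [hg, gcd_ten, if_pos h2, if_neg h5]
      obtain ⟨j, hj⟩ := h2
      have hj0 : j ≠ 0 := by rintro rfl; omega
      have e2 : n / 2 = j := by rw [hj, Int.mul_ediv_cancel_left _ (by omega)]
      have hlt : (n / 2).natAbs < n.natAbs := natAbs_ediv_lt (by decide) ⟨j, hj⟩ hn
      rw [loopB_step hn (by rw [hgv]; decide), hgv,
        ih (n / 2) (by omega) (by rw [e2]; exact hj0), strip2A_step hn ⟨j, hj⟩]
    · -- g = 5
      have hgv : pyGcd n 10 = 5 := by rw [hg, gcd_ten, if_neg h2, if_pos h5]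
      obtain ⟨j, hj⟩ := h5
      have hj0 : j ≠ 0 := by rintro rfl; omega
      have e5 : n / 5 = j := by rw [hj, Int.mul_ediv_cancel_left _ (by omega)]
      have hlt : (n / 5).natAbs < n.natAbs := natAbs_ediv_lt (by decide) ⟨j, hj⟩ hn
      rw [loopB_step hn (by rw [hgv]; decide), hgv,
        ih (n / 5) (by omega) (by rw [e5]; exact hj0),
        strip_five_aux n.natAbs n le_rfl hn ⟨j, hj⟩]
    · -- g = 1 : loop stops; both strips are identity
      have hgv : pyGcd n 10 = 1 := by rw [hg, gcd_ten, if_neg h2, if_neg h5]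
      rw [loopB_stop hgv, strip2A_stop h2, strip5A_stop h5]

-- ===== VERDICT (by name: the statement is the Claim_ definition above) =====
theorem factorize_spec : Claim_equal_factorize := by
  intro n _ hpre
  unfold Spec_factorize factorize factorize_alt
  show (if strip5A (strip2A n) ≠ 1 then false else true) = decide (loopB n = 1)
  rw [loopB_eq_aux n.natAbs n le_rfl hpre]
  by_cases h : strip5A (strip2A n) = 1 <;> simp [h]
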